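-- pv_equiv track=rewrite | github.com/Junaem/Algorithm_py | 신규_아이디_추천.py | solution
-- ===== SOURCE A (Python) =====
-- def solution(new_id):
--     new_id = new_id.lower()
--     ret = ''
--     for i in range(len(new_id)):
--         if 48 <= ord(new_id[i]) <= 57 or 97 <= ord(new_id[i]) <=122:
--             ret += new_id[i]
--         elif ord(new_id[i]) == 45 or ord(new_id[i]) == 95:
--             ret += new_id[i]
--         elif ord(new_id[i]) == 46 and (ret!='' and ret[-1]!='.') and 0<i<len(new_id)-1:
--             ret += '.'
--
--     while ret!='' and ret[-1]=='.':
--         ret = ret[:-1]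
--
--     if ret == '':
--         ret = 'a'
--
--     if len(ret) > 15:
--         ret = ret[:15]
--
--         while ret[-1]=='.':
--             ret = ret[:-1]
--
--     while len(ret) < 3:
--         ret += ret[-1]
--
--     return ret
-- ===== SOURCE B (Python) =====
-- def solution(new_id):
--     # global-passes pipeline: filter kept chars, split on '.' and rejoin the
--     # nonempty pieces (collapses dot runs and strips leading/trailing dots),
--     # then truncate/strip/pad.
--     kept = [c for c in new_id.lower() if c.isdigit() or ('a' <= c <= 'z') or c in '-_.']
--     s = '.'.join(p for p in ''.join(kept).split('.') if p)
--     if not s: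
--         s = 'a'
--     s = s[:15]
--     if s.endswith('.'):
--         s = s[:-1]
--     return s + s[-1] * (3 - len(s))
-- ===== Notes on version B (the rewrite author's own statement) =====
-- stated objective: idiomatic
-- what changed: B replaces A's single indexed character-walk (which tracks the previously kept character and the position in the string to decide each dot) by a pipeline of global passes: lowercase, filter the allowed characters, split on the dot character and rejoin the nonempty pieces (which collapses dot runs and strips boundary dots in one stroke), then truncate, drop at most one trailing dot, and pad by an arithmetic replicate formula instead of A's three while-loops.
import Mathlib
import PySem

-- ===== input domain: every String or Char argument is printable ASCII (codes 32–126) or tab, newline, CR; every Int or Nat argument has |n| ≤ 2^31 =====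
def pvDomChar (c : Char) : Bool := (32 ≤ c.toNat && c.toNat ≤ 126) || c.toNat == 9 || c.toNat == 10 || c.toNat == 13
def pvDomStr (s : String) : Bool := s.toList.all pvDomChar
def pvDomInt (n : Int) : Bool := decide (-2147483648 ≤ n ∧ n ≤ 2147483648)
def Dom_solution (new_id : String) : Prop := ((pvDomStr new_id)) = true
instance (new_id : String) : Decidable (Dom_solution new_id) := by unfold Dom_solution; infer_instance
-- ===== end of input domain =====

-- B replaces A's indexed character-walk by a split/join pipeline of global passes (idiomatic, same cost).


-- ===== PORT A =====
-- `while ret != '' and ret[-1] == '.': ret = ret[:-1]`  (ret[:-1] is dropLast by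
-- PySem.List.slice_to_neg_one; `ret ≠ [] ∧ ret[-1] = '.'` is `ret.getLast? = some '.'`.
-- A's second while omits the emptiness guard, which is unreachable there: getLast? = none
-- stops this loop the same way.)
def solStrip (ret : List Char) : List Char :=
  if h : ret.getLast? = some '.' then solStrip ret.dropLast else ret
termination_by ret.length
decreasing_by
  have : ret ≠ [] := by intro he; subst he; simp at h
  simpa [List.length_dropLast] using Nat.sub_lt (List.length_pos_iff.mpr this) Nat.one_pos

-- `while len(ret) < 3: ret += ret[-1]`
def solPad (ret : List Char) : List Char :=
  if ret.length < 3 then solPad (ret ++ [PySem.List.pyGetD ret (-1) ' ']) else ret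
termination_by 3 - ret.length
decreasing_by simp; omega

-- `for i in range(len(new_id)): …` walked as structural recursion over the chars with index i
def solLoop (n : Nat) : List Char → Nat → List Char → List Char
  | [], _, ret => ret
  | c :: cs, i, ret =>
    solLoop n cs (i + 1)
      (if (48 ≤ c.toNat ∧ c.toNat ≤ 57) ∨ (97 ≤ c.toNat ∧ c.toNat ≤ 122) then ret ++ [c]
       else if c.toNat = 45 ∨ c.toNat = 95 then ret ++ [c]
       else if c.toNat = 46 ∧ (ret ≠ [] ∧ PySem.List.pyGetD ret (-1) ' ' ≠ '.') ∧ 0 < i ∧ i < n - 1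
         then ret ++ ['.']
       else ret)

def solution (new_id : String) : String :=
  let s := PySem.Chars.lower new_id.toList            -- new_id = new_id.lower()
  let ret := solLoop s.length s 0 []                  -- for i in range(len(new_id)): …
  let ret := solStrip ret                             -- while ret != '' and ret[-1]=='.': …
  let ret := if ret = [] then ['a'] else ret          -- if ret == '': ret = 'a'
  let ret := if 15 < ret.length                       -- if len(ret) > 15: ret = ret[:15]; while …
    then solStrip (PySem.List.slice ret none (some 15)) else ret
  String.ofList (solPad ret)                              -- while len(ret) < 3: …

-- ===== PORT B =====
-- `c.isdigit() or 'a' <= c <= 'z' or c in '-_.'`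
def altKeep (c : Char) : Bool :=
  PySem.Chars.isdigit c || ('a' ≤ c && c ≤ 'z') || PySem.Chars.isIn [c] ['-', '_', '.']

def solution_alt (new_id : String) : String :=
  let kept := (PySem.Chars.lower new_id.toList).filter altKeep
  let s := PySem.Chars.join ['.']                     -- '.'.join(p for p in ….split('.') if p)
    ((PySem.Chars.splitOn kept ['.']).filter (fun p => p ≠ []))
  let s := if s = [] then ['a'] else s                -- if not s: s = 'a'
  let s := PySem.List.slice s none (some 15)          -- s = s[:15]
  let s := if PySem.Chars.endswith s ['.']            -- if s.endswith('.'): s = s[:-1]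
    then PySem.List.slice s none (some (-1)) else s
  String.ofList (s ++ List.replicate (3 - s.length) (PySem.List.pyGetD s (-1) ' '))
                                                      -- return s + s[-1] * (3 - len(s))

-- ===== PRECONDITION & SPEC =====
def Spec_solution (new_id : String) (out : String) : Prop := out = solution_alt new_id
instance (new_id : String) (out : String) : Decidable (Spec_solution new_id out) := by unfold Spec_solution; infer_instance

-- ===== CLAIM (what is proved, stated in full; the proofs are below) =====
def Claim_equal_solution : Prop := ∀ (new_id : String), Dom_solution new_id → Spec_solution new_id (solution new_id)

-- ===== LEMMAS AND PROOFS =====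

-- proof-side vocabulary ------------------------------------------------------
-- A's keep predicates
def wordA (c : Char) : Bool :=
  (48 ≤ c.toNat && c.toNat ≤ 57) || (97 ≤ c.toNat && c.toNat ≤ 122) || c.toNat == 45 || c.toNat == 95

def keepC (c : Char) : Bool := wordA c || c == '.'

-- A's loop with the index bookkeeping removed
def collapseC : List Char → List Char → List Char
  | ret, [] => ret
  | ret, c :: cs =>
    collapseC
      (if wordA c then ret ++ [c]
       else if c = '.' ∧ ret ≠ [] ∧ ret.getLast? ≠ some '.' then ret ++ ['.']
       else ret) cs

-- collapse of a kept-only list from a state that does/doesn't end in '.'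
def gCol (lastDot : Bool) : List Char → List Char
  | [] => []
  | c :: cs => if c = '.' then (if lastDot then gCol true cs else '.' :: gCol true cs)
               else c :: gCol false cs

-- maximal nonempty dot-free blocks
def blocksC : List Char → List (List Char)
  | [] => []
  | c :: cs =>
    if c = '.' then blocksC cs
    else (c :: cs.takeWhile (fun x => x != '.')) :: blocksC (cs.dropWhile (fun x => x != '.'))
termination_by l => l.length
decreasing_by
  · simp
  · exact Nat.lt_succ_of_le (List.length_dropWhile_le _ _)

def joinB : List (List Char) → List Char
  | [] => []
  | [p] => p
  | p :: ps => p ++ '.' :: joinB ps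

def Jc (cs : List Char) : List Char := joinB (blocksC cs)

-- strip trailing dots, closed form
def rstripDots (x : List Char) : List Char := (x.reverse.dropWhile (fun c => c == '.')).reverse

-- accumulator form of str.split('.')
def splitAcc : List Char → List Char → List (List Char)
  | pre, [] => [pre]
  | pre, c :: cs => if c = '.' then pre :: splitAcc [] cs else splitAcc (pre ++ [c]) cs

def noDD (x : List Char) : Prop := List.IsChain (fun a b => a ≠ '.' ∨ b ≠ '.') x


-- --- rstripDots facts --------------------------------------------------------
theorem rstripDots_append_dot (x : List Char) : rstripDots (x ++ ['.']) = rstripDots x := by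
  simp [rstripDots]

theorem rstripDots_no_dot (x : List Char) (h : x.getLast? ≠ some '.') : rstripDots x = x := by
  unfold rstripDots
  cases hx : x.reverse with
  | nil => simpa using congrArg List.reverse hx
  | cons c r =>
    have hc : x.getLast? = some c := by rw [← List.head?_reverse, hx]; rfl
    have : (c == '.') = false := by
      simp only [beq_eq_false_iff_ne]; intro h'; exact h (h' ▸ hc)
    rw [List.dropWhile_cons_of_neg (by simp [this]), ← hx, List.reverse_reverse]

theorem solStrip_eq (x : List Char) : solStrip x = rstripDots x := by
  rw [solStrip]
  split
  · next h =>
    obtain ⟨ys, rfl⟩ := List.getLast?_eq_some_iff.mp h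
    rw [List.dropLast_concat, solStrip_eq ys, rstripDots_append_dot]
  · next h => rw [rstripDots_no_dot _ h]
termination_by x.length
decreasing_by subst_vars; simp [List.length_append]

theorem rstripDots_getLast (x : List Char) : (rstripDots x).getLast? ≠ some '.' := by
  unfold rstripDots
  rw [List.getLast?_reverse]
  cases hd : x.reverse.dropWhile (fun c => c == '.') with
  | nil => simp
  | cons c r =>
    have h2 := List.head?_dropWhile_not (fun c => c == '.') x.reverse
    rw [hd] at h2
    simp at h2
    intro h
    injection h with h
    exact h2 h

theorem rstripDots_cons (c : Char) (xs : List Char) :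
    rstripDots (c :: xs) =
      if rstripDots xs = [] then (if c = '.' then [] else [c]) else c :: rstripDots xs := by
  unfold rstripDots
  rw [show (c :: xs).reverse = xs.reverse ++ [c] by simp, List.dropWhile_append]
  by_cases h : xs.reverse.dropWhile (fun c => c == '.') = []
  · simp only [h, List.isEmpty_nil, if_pos, List.reverse_nil, List.dropWhile_cons,
      List.dropWhile_nil, if_true]
    by_cases hc : c = '.' <;> simp [hc]
  · rw [if_neg (by simp [List.isEmpty_iff, h]), if_neg (by simp [h])]
    simp

-- --- A's loop = index-free collapse ------------------------------------------
theorem toNat_eq_iff (c d : Char) : c.toNat = d.toNat ↔ c = d :=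
  ⟨fun h => by rw [← Char.ofNat_toNat c, h, Char.ofNat_toNat], fun h => by rw [h]⟩

theorem char_le_iff (c d : Char) : c ≤ d ↔ c.toNat ≤ d.toNat := by
  rw [Char.le_def]; exact UInt32.le_iff_toNat_le

theorem wordA_ne_dot (c : Char) (h : wordA c = true) : ¬ c = '.' := by
  intro heq; rw [heq] at h; exact absurd h (by decide)

theorem toNat46_iff (c : Char) : c.toNat = 46 ↔ c = '.' :=
  (show ('.' : Char).toNat = 46 from rfl) ▸ toNat_eq_iff c '.'

theorem loop_eq_collapse (cs : List Char) : ∀ (i : ℕ) (ret : List Char) (n : ℕ),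
    (ret ≠ [] → 0 < i) → i + cs.length = n →
    rstripDots (solLoop n cs i ret) = rstripDots (collapseC ret cs) := by
  induction cs with
  | nil => intro i ret n _ _; rfl
  | cons c r ih =>
    intro i ret n hinv hn
    rw [solLoop, collapseC]
    by_cases hw : wordA c = true
    · have hb : ((48 ≤ c.toNat ∧ c.toNat ≤ 57) ∨ (97 ≤ c.toNat ∧ c.toNat ≤ 122)) ∨
          (c.toNat = 45 ∨ c.toNat = 95) := by
        simp only [wordA, Bool.or_eq_true, decide_eq_true_eq, Bool.and_eq_true,
          beq_iff_eq] at hw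
        omega
      have hY : (if wordA c = true then ret ++ [c]
          else if c = '.' ∧ ret ≠ [] ∧ ret.getLast? ≠ some '.' then ret ++ ['.'] else ret)
          = ret ++ [c] := if_pos hw
      have hX : (if (48 ≤ c.toNat ∧ c.toNat ≤ 57) ∨ (97 ≤ c.toNat ∧ c.toNat ≤ 122) then ret ++ [c]
          else if c.toNat = 45 ∨ c.toNat = 95 then ret ++ [c]
          else if c.toNat = 46 ∧ (ret ≠ [] ∧ PySem.List.pyGetD ret (-1) ' ' ≠ '.') ∧ 0 < i ∧ i < n - 1
            then ret ++ ['.'] else ret) = ret ++ [c] := by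
        rcases hb with h | h
        · rw [if_pos h]
        · rw [if_neg (by omega), if_pos h]
      rw [hX, hY]
      exact ih (i + 1) (ret ++ [c]) n (fun _ => Nat.succ_pos i) (by simp at hn ⊢; omega)
    · have hb : ¬ ((48 ≤ c.toNat ∧ c.toNat ≤ 57) ∨ (97 ≤ c.toNat ∧ c.toNat ≤ 122)) ∧
          ¬ (c.toNat = 45 ∨ c.toNat = 95) := by
        simp only [wordA, Bool.or_eq_true, decide_eq_true_eq, Bool.and_eq_true,
          beq_iff_eq] at hw
        push Not at hw ⊢
        omega
      by_cases hdot : c = '.'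
      · have h46 : c.toNat = 46 := (toNat46_iff c).mpr hdot
        by_cases hcond : ret ≠ [] ∧ ret.getLast? ≠ some '.'
        · have hne := hcond.1
          have hgd : PySem.List.pyGetD ret (-1) ' ' ≠ '.' := by
            rw [PySem.List.pyGetD_neg_one ret ' ' hne]
            intro h
            exact hcond.2 (by rw [List.getLast?_eq_some_getLast hne, h])
          have hi : 0 < i := hinv hne
          by_cases hlt : i < n - 1
          · rw [if_neg hb.1, if_neg hb.2, if_pos ⟨h46, ⟨hne, hgd⟩, hi, hlt⟩,
              if_neg hw, if_pos ⟨hdot, hne, hcond.2⟩]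
            exact ih (i + 1) (ret ++ ['.']) n (fun _ => Nat.succ_pos i) (by simp at hn ⊢; omega)
          · have hr : r = [] := by
              have : r.length = 0 := by simp at hn; omega
              exact List.length_eq_zero_iff.mp this
            subst hr
            rw [if_neg hb.1, if_neg hb.2, if_neg (by intro h; exact hlt h.2.2.2),
              if_neg hw, if_pos ⟨hdot, hne, hcond.2⟩]
            rw [solLoop, collapseC]
            exact (rstripDots_append_dot ret).symm
        · have hX : ¬ (c.toNat = 46 ∧ (ret ≠ [] ∧ PySem.List.pyGetD ret (-1) ' ' ≠ '.') ∧
              0 < i ∧ i < n - 1) := by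
            intro h
            apply hcond
            refine ⟨h.2.1.1, ?_⟩
            have := h.2.1.2
            rw [PySem.List.pyGetD_neg_one ret ' ' h.2.1.1] at this
            rw [List.getLast?_eq_some_getLast h.2.1.1]
            intro he
            exact this (Option.some_injective _ he)
          rw [if_neg hb.1, if_neg hb.2, if_neg hX, if_neg hw,
            if_neg (by intro h; exact hcond ⟨h.2.1, h.2.2⟩)]
          exact ih (i + 1) ret n (fun _ => Nat.succ_pos i) (by simp at hn ⊢; omega)
      · have h46 : ¬ c.toNat = 46 := fun h => hdot ((toNat46_iff c).mp h)
        rw [if_neg hb.1, if_neg hb.2, if_neg (fun h => h46 h.1), if_neg hw,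
          if_neg (fun h => hdot h.1)]
        exact ih (i + 1) ret n (fun _ => Nat.succ_pos i) (by simp at hn ⊢; omega)

theorem collapse_filter (cs : List Char) : ∀ ret : List Char,
    collapseC ret cs = collapseC ret (cs.filter keepC) := by
  induction cs with
  | nil => intro ret; rfl
  | cons c r ih =>
    intro ret
    by_cases hk : keepC c = true
    · rw [List.filter_cons_of_pos hk, collapseC, collapseC]
      exact ih _
    · have hw : wordA c = false := by
        cases h : wordA c
        · rfl
        · exact absurd (by simp [keepC, h]) hk
      have hd : ¬ c = '.' := by
        intro h
        exact hk (by simp [keepC, h])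
      rw [List.filter_cons_of_neg (by simp [hk]), collapseC,
        if_neg (by simp [hw]), if_neg (fun h => hd h.1)]
      exact ih ret

theorem collapse_ne (cs : List Char) : ∀ ret : List Char, (∀ c ∈ cs, keepC c = true) →
    ret ≠ [] → collapseC ret cs = ret ++ gCol (ret.getLast? == some '.') cs := by
  induction cs with
  | nil => intro ret _ _; simp [collapseC, gCol]
  | cons c r ih =>
    intro ret hk hne
    rw [collapseC, gCol]
    by_cases hw : wordA c = true
    · have hcd : ¬ c = '.' := wordA_ne_dot c hw
      rw [if_pos hw, if_neg hcd,
        ih (ret ++ [c]) (fun d hd => hk d (List.mem_cons_of_mem _ hd)) (by simp),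
        List.getLast?_concat, show (some c == some '.') = false by simp [hcd]]
      simp
    · have hdot : c = '.' := by
        have := hk c List.mem_cons_self
        simp [keepC, hw] at this
        exact this
      subst hdot
      by_cases hl : ret.getLast? = some '.'
      · rw [if_neg hw, if_neg (fun h => h.2.2 hl),
          ih ret (fun d hd => hk d (List.mem_cons_of_mem _ hd)) hne, hl,
          show (some '.' == some '.') = true by simp]
        simp
      · rw [if_neg hw, if_pos ⟨rfl, hne, hl⟩,
          ih (ret ++ ['.']) (fun d hd => hk d (List.mem_cons_of_mem _ hd)) (by simp),
          List.getLast?_concat, show (ret.getLast? == some '.') = false by simp [hl],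
          show (some '.' == some '.') = true by simp]
        simp

theorem collapse_nil (cs : List Char) (hk : ∀ c ∈ cs, keepC c = true) :
    collapseC [] cs = gCol true cs := by
  cases cs with
  | nil => rfl
  | cons c r =>
    rw [collapseC, gCol]
    by_cases hw : wordA c = true
    · have hcd : ¬ c = '.' := wordA_ne_dot c hw
      rw [if_pos hw, if_neg hcd,
        collapse_ne r ([] ++ [c]) (fun d hd => hk d (List.mem_cons_of_mem _ hd)) (by simp)]
      rw [show (([] ++ [c] : List Char).getLast? == some '.') = false by simp [hcd]]
      simp
    · have hdot : c = '.' := by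
        have := hk c List.mem_cons_self
        simp [keepC, hw] at this
        exact this
      subst hdot
      rw [if_neg hw, if_neg (by simp), if_pos rfl]
      exact collapse_nil r (fun d hd => hk d (List.mem_cons_of_mem _ hd))

-- --- blocks / join facts -----------------------------------------------------
theorem joinB_cons (x : List Char) (bs : List (List Char)) :
    joinB (x :: bs) = x ++ (if bs = [] then [] else '.' :: joinB bs) := by
  cases bs <;> simp [joinB]

theorem intercalate_eq_joinB (bs : List (List Char)) : List.intercalate ['.'] bs = joinB bs := by
  induction bs with
  | nil => simp [List.intercalate, joinB]
  | cons x bs ih =>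
    cases bs with
    | nil => simp [List.intercalate, joinB]
    | cons y t =>
      rw [show joinB (x :: y :: t) = x ++ '.' :: joinB (y :: t) from rfl, ← ih]
      simp [List.intercalate, List.intersperse]

theorem blocks_sound (cs : List Char) : ∀ b ∈ blocksC cs, b ≠ [] ∧ '.' ∉ b := by
  fun_induction blocksC cs with
  | case1 => simp
  | case2 cs ih => exact ih
  | case3 c cs hc ih =>
    intro b hb
    rcases List.mem_cons.mp hb with rfl | hb
    · refine ⟨by simp, ?_⟩
      intro hmem
      rcases List.mem_cons.mp hmem with h | h
      · exact hc h.symm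
      · have := List.mem_takeWhile_imp h
        simp at this
    · exact ih b hb

theorem joinB_eq_nil_iff (bs : List (List Char)) (h : ∀ b ∈ bs, b ≠ []) :
    joinB bs = [] ↔ bs = [] := by
  cases bs with
  | nil => simp [joinB]
  | cons x t =>
    rw [joinB_cons]
    simp only [List.append_eq_nil_iff]
    constructor
    · intro hx
      exact absurd hx.1 (h x List.mem_cons_self)
    · intro hx
      exact absurd hx (by simp)

theorem joinB_head (bs : List (List Char)) (h : ∀ b ∈ bs, b ≠ [] ∧ '.' ∉ b) :
    (joinB bs).head? ≠ some '.' := by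
  cases bs with
  | nil => simp [joinB]
  | cons x t =>
    rw [joinB_cons]
    obtain ⟨hne, hnd⟩ := h x List.mem_cons_self
    cases x with
    | nil => exact absurd rfl hne
    | cons c cx =>
      simp only [List.cons_append, List.head?_cons, Option.some.injEq]
      intro hc
      injection hc with hc
      exact hnd (List.mem_cons.mpr (Or.inl hc.symm))

theorem Jc_head (cs : List Char) : (Jc cs).head? ≠ some '.' :=
  joinB_head _ (blocks_sound cs)

theorem noDD_of_no_dot (x : List Char) (h : '.' ∉ x) : noDD x := by
  induction x with
  | nil => exact List.IsChain.nil
  | cons c r ih =>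
    rw [noDD, List.isChain_cons]
    refine ⟨fun y _ => Or.inl (fun hc => h (by simp [hc])), ih (fun hc => h (List.mem_cons_of_mem _ hc))⟩

theorem joinB_noDD (bs : List (List Char)) (h : ∀ b ∈ bs, b ≠ [] ∧ '.' ∉ b) :
    noDD (joinB bs) := by
  induction bs with
  | nil => exact List.IsChain.nil
  | cons x t ih =>
    rw [joinB_cons]
    obtain ⟨hne, hnd⟩ := h x List.mem_cons_self
    by_cases ht : t = []
    · subst ht
      simpa using noDD_of_no_dot x hnd
    · rw [if_neg ht]
      rw [noDD, List.isChain_append]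
      refine ⟨noDD_of_no_dot x hnd, ?_, ?_⟩
      · rw [List.isChain_cons]
        refine ⟨?_, ih (fun b hb => h b (List.mem_cons_of_mem _ hb))⟩
        intro y hy
        right
        intro hy'
        subst hy'
        exact joinB_head t (fun b hb => h b (List.mem_cons_of_mem _ hb)) hy
      · intro a _ b hb
        left
        intro ha
        subst ha
        exact hnd (List.mem_of_mem_getLast? (by assumption))

-- --- the crux: stripped collapse = join of blocks ----------------------------
theorem blocksC_nil : blocksC [] = [] := by
  rw [blocksC.eq_def]

theorem blocksC_cons (c : Char) (r : List Char) :
    blocksC (c :: r) = if c = '.' then blocksC r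
      else (c :: r.takeWhile (fun x => x != '.')) :: blocksC (r.dropWhile (fun x => x != '.')) := by
  rw [blocksC.eq_def]

theorem Jc_nil_iff (cs : List Char) : Jc cs = [] ↔ blocksC cs = [] :=
  joinB_eq_nil_iff _ (fun b hb => (blocks_sound cs b hb).1)

theorem gCol_strip (n : ℕ) : ∀ cs : List Char, cs.length ≤ n →
    rstripDots (gCol true cs) = Jc cs ∧
    rstripDots (gCol false cs) =
      (if cs.head? = some '.' then (if blocksC cs = [] then [] else '.' :: Jc cs) else Jc cs) := by
  induction n with
  | zero =>
    intro cs hcs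
    have : cs = [] := List.length_eq_zero_iff.mp (Nat.le_zero.mp hcs)
    subst this
    constructor <;> simp [gCol, rstripDots, Jc, blocksC_nil, joinB]
  | succ n ih =>
    intro cs hcs
    cases cs with
    | nil => constructor <;> simp [gCol, rstripDots, Jc, blocksC_nil, joinB]
    | cons c r =>
      have hr : r.length ≤ n := by simpa using hcs
      by_cases hc : c = '.'
      · subst hc
        have h1 := (ih r hr).1
        have hbr : blocksC ('.' :: r) = blocksC r := by rw [blocksC_cons]; simp
        have hJr : Jc ('.' :: r) = Jc r := by rw [Jc, hbr]; rfl
        constructor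
        · rw [show gCol true ('.' :: r) = gCol true r from by simp [gCol], h1, hJr]
        · rw [show gCol false ('.' :: r) = '.' :: gCol true r from by simp [gCol],
            rstripDots_cons, h1, hJr, hbr]
          by_cases hb : blocksC r = []
          · simp [hb, (Jc_nil_iff r).mpr hb]
          · have hne : Jc r ≠ [] := fun h => hb ((Jc_nil_iff r).mp h)
            simp [hb, hne]
      · have key : rstripDots (c :: gCol false r) = Jc (c :: r) := by
          rw [rstripDots_cons, if_neg hc]
          have hJcr : Jc (c :: r) = (c :: r.takeWhile (fun x => x != '.'))
              ++ (if blocksC (r.dropWhile (fun x => x != '.')) = [] then []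
                  else '.' :: joinB (blocksC (r.dropWhile (fun x => x != '.')))) := by
            rw [Jc, blocksC_cons, if_neg hc, joinB_cons]
          cases r with
          | nil =>
            simp [gCol, rstripDots, hJcr, blocksC_nil]
          | cons d r2 =>
            have hr2 : (d :: r2).length ≤ n := hr
            by_cases hd : d = '.'
            · subst hd
              have ihf := (ih _ hr2).2
              rw [if_pos (by simp)] at ihf
              have hbr : blocksC ('.' :: r2) = blocksC r2 := by rw [blocksC_cons]; simp
              have hJr : Jc ('.' :: r2) = Jc r2 := by rw [Jc, hbr]; rfl
              have htw : List.takeWhile (fun x => x != '.') ('.' :: r2) = [] := by simp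
              have hdw : List.dropWhile (fun x => x != '.') ('.' :: r2) = '.' :: r2 := by simp
              rw [ihf, hJcr, htw, hdw, hbr, hJr]
              by_cases hb : blocksC r2 = []
              · simp [hb]
              · have hne : Jc r2 ≠ [] := fun h => hb ((Jc_nil_iff r2).mp h)
                simp only [hb, if_neg, ite_false]
                simp [hb, Jc]
            · have ihf := (ih _ hr2).2
              rw [if_neg (by simp [hd])] at ihf
              have hbne : blocksC (d :: r2) ≠ [] := by
                rw [blocksC_cons, if_neg hd]; simp
              have hane : Jc (d :: r2) ≠ [] := fun h => hbne ((Jc_nil_iff _).mp h)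
              have hJdr : Jc (d :: r2) = (d :: r2.takeWhile (fun x => x != '.'))
                  ++ (if blocksC (r2.dropWhile (fun x => x != '.')) = [] then []
                      else '.' :: joinB (blocksC (r2.dropWhile (fun x => x != '.')))) := by
                rw [Jc, blocksC_cons, if_neg hd, joinB_cons]
              have htw : List.takeWhile (fun x => x != '.') (d :: r2)
                  = d :: List.takeWhile (fun x => x != '.') r2 := by simp [hd]
              have hdw : List.dropWhile (fun x => x != '.') (d :: r2)
                  = List.dropWhile (fun x => x != '.') r2 := by simp [hd]
              rw [ihf, if_neg hane, hJcr, htw, hdw, hJdr]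
              simp
        constructor
        · rw [show gCol true (c :: r) = c :: gCol false r from by simp [gCol, hc]]
          exact key
        · rw [show gCol false (c :: r) = c :: gCol false r from by simp [gCol, hc],
            if_neg (by simp [hc])]
          exact key

-- --- str.split('.') ----------------------------------------------------------
theorem go_eq (l : List Char) : ∀ (fuel : ℕ) (cur : List Char) (acc : List (List Char)),
    l.length < fuel →
    PySem.Chars.splitOn.go ['.'] fuel l cur acc = acc.reverse ++ splitAcc cur.reverse l := by
  induction l with
  | nil =>
    intro fuel cur acc hf
    cases fuel with
    | zero => omega
    | succ m => simp [PySem.Chars.splitOn.go, splitAcc]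
  | cons c rest ih =>
    intro fuel cur acc hf
    cases fuel with
    | zero => omega
    | succ m =>
      rw [PySem.Chars.splitOn.go]
      by_cases hc : c = '.'
      · subst hc
        rw [if_pos (by simp), show List.drop (['.'] : List Char).length ('.' :: rest) = rest from rfl,
          ih m [] (cur.reverse :: acc) (by simp at hf; omega)]
        simp [splitAcc]
      · rw [if_neg (by simp [Ne.symm hc]), ih m (c :: cur) acc (by simp at hf; omega)]
        simp [splitAcc, hc]

theorem splitOn_eq (cs : List Char) : PySem.Chars.splitOn cs ['.'] = splitAcc [] cs := by
  rw [PySem.Chars.splitOn, go_eq cs (cs.length + 1) [] [] (by omega)]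
  rfl

theorem splitAcc_modifyHead (l : List Char) : ∀ pre : List Char,
    splitAcc pre l = (splitAcc [] l).modifyHead (pre ++ ·) := by
  induction l with
  | nil => intro pre; simp [splitAcc]
  | cons c cs ih =>
    intro pre
    by_cases hc : c = '.'
    · subst hc
      simp [splitAcc]
    · rw [splitAcc, if_neg hc, ih (pre ++ [c]),
        show splitAcc [] (c :: cs) = splitAcc ([] ++ [c]) cs from by rw [splitAcc, if_neg hc],
        ih ([] ++ [c]), List.modifyHead_modifyHead]
      congr 1
      funext x
      simp

theorem splitAcc_head_tail (l : List Char) :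
    splitAcc [] l = (l.takeWhile (fun x => x != '.')) ::
      (splitAcc [] (l.dropWhile (fun x => x != '.'))).tail := by
  induction l with
  | nil => simp [splitAcc]
  | cons c cs ih =>
    by_cases hc : c = '.'
    · subst hc
      simp [splitAcc]
    · rw [show splitAcc [] (c :: cs) = splitAcc ([] ++ [c]) cs from by rw [splitAcc, if_neg hc],
        splitAcc_modifyHead, ih,
        show List.takeWhile (fun x => x != '.') (c :: cs)
          = c :: List.takeWhile (fun x => x != '.') cs from by simp [hc],
        show List.dropWhile (fun x => x != '.') (c :: cs)
          = List.dropWhile (fun x => x != '.') cs from by simp [hc]]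
      simp

theorem filter_splitAcc (n : ℕ) : ∀ l : List Char, l.length ≤ n →
    (splitAcc [] l).filter (fun p => p ≠ []) = blocksC l := by
  induction n with
  | zero =>
    intro l hl
    have : l = [] := List.length_eq_zero_iff.mp (Nat.le_zero.mp hl)
    subst this
    simp [splitAcc, blocksC_nil]
  | succ n ih =>
    intro l hl
    cases l with
    | nil => simp [splitAcc, blocksC_nil]
    | cons c r =>
      have hrn : r.length ≤ n := by simpa using hl
      by_cases hc : c = '.'
      · subst hc
        rw [splitAcc, if_pos rfl, blocksC_cons, if_pos rfl, List.filter_cons_of_neg (by simp)]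
        exact ih r hrn
      · rw [show splitAcc [] (c :: r) = splitAcc ([] ++ [c]) r from by rw [splitAcc, if_neg hc],
          splitAcc_modifyHead, splitAcc_head_tail, blocksC_cons, if_neg hc]
        rw [List.modifyHead_cons, List.filter_cons_of_pos (by simp)]
        congr 1
        cases hdw : List.dropWhile (fun x => x != '.') r with
        | nil => simp [splitAcc, blocksC_nil]
        | cons d r2 =>
          have hd : d = '.' := by
            have h2 := List.head?_dropWhile_not (fun x => x != '.') r
            rw [hdw] at h2
            simpa using h2
          subst hd
          rw [show splitAcc [] ('.' :: r2) = [] :: splitAcc [] r2 from by simp [splitAcc],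
            blocksC_cons, if_pos rfl, List.tail_cons]
          exact ih r2 (by
            have h3 := List.length_dropWhile_le (fun x => x != '.') r
            rw [hdw] at h3
            simp at h3
            omega)

-- --- the two keep predicates agree -------------------------------------------
theorem altKeep_eq_keepC (c : Char) : altKeep c = keepC c := by
  rw [Bool.eq_iff_iff]
  simp only [altKeep, keepC, wordA, PySem.Chars.isdigit, Bool.or_eq_true, Bool.and_eq_true,
    decide_eq_true_eq, beq_iff_eq, PySem.Chars.isIn_iff_infix, List.singleton_infix_iff,
    List.mem_cons, List.not_mem_nil, or_false,
    char_le_iff, ← toNat_eq_iff c '-', ← toNat_eq_iff c '_', ← toNat_eq_iff c '.',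
    show ('0':Char).toNat = 48 from rfl, show ('9':Char).toNat = 57 from rfl,
    show ('a':Char).toNat = 97 from rfl, show ('z':Char).toNat = 122 from rfl,
    show ('-':Char).toNat = 45 from rfl, show ('_':Char).toNat = 95 from rfl,
    show ('.':Char).toNat = 46 from rfl]
  omega

theorem endswith_dot_iff (s : List Char) :
    PySem.Chars.endswith s ['.'] = true ↔ s.getLast? = some '.' := by
  rw [PySem.Chars.endswith_iff, List.getLast?_eq_some_iff]
  constructor
  · rintro ⟨t, ht⟩
    exact ⟨t, ht.symm⟩
  · rintro ⟨t, ht⟩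
    exact ⟨t, ht.symm⟩

-- --- tail steps ---------------------------------------------------------------
theorem pad_eq (m : ℕ) : ∀ x : List Char, x ≠ [] → m = 3 - x.length →
    solPad x = x ++ List.replicate (3 - x.length) (PySem.List.pyGetD x (-1) ' ') := by
  induction m with
  | zero =>
    intro x _ hm
    rw [solPad, if_neg (by omega)]
    rw [← hm]
    simp
  | succ m ih =>
    intro x hx hm
    have hlt : x.length < 3 := by omega
    rw [solPad, if_pos hlt,
      ih (x ++ [PySem.List.pyGetD x (-1) ' ']) (by simp) (by simp; omega),
      PySem.List.pyGetD_neg_one_append_singleton]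
    rw [show (3 - (x ++ [PySem.List.pyGetD x (-1) ' ']).length) = m from by simp; omega,
      show (3 - x.length) = m + 1 from by omega]
    simp [List.replicate_succ]

theorem noDD_take (s : List Char) (k : ℕ) (h : noDD s) : noDD (s.take k) :=
  List.IsChain.take h k

theorem tail_eq (s : List Char) (hne : s ≠ []) (hhd : s.head? ≠ some '.')
    (hdd : noDD s) (hlast : s.getLast? ≠ some '.') :
    solPad (if 15 < s.length then solStrip (PySem.List.slice s none (some 15)) else s) =
      (let s' := PySem.List.slice s none (some 15)
       let s'' := if PySem.Chars.endswith s' ['.'] then PySem.List.slice s' none (some (-1)) else s'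
       s'' ++ List.replicate (3 - s''.length) (PySem.List.pyGetD s'' (-1) ' ')) := by
  have hslice : PySem.List.slice s none (some 15) = s.take 15 := by
    rw [PySem.List.slice_to s (by norm_num)]
    rfl
  simp only [hslice]
  have htne : s.take 15 ≠ [] := by
    cases s with
    | nil => exact absurd rfl hne
    | cons a t => simp
  have hhd' : (s.take 15).head? ≠ some '.' := by
    cases s with
    | nil => exact absurd rfl hne
    | cons a t => simpa using hhd
  by_cases h15 : 15 < s.length
  · rw [if_pos h15, solStrip_eq]
    have hddt := noDD_take s 15 hdd
    by_cases hl : (s.take 15).getLast? = some '.'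
    · obtain ⟨u, hu⟩ := List.getLast?_eq_some_iff.mp hl
      have hune : u ≠ [] := by
        intro h
        rw [h] at hu
        rw [hu] at hhd'
        simp at hhd'
      have hu_last : u.getLast? ≠ some '.' := by
        rw [hu, noDD, List.isChain_append] at hddt
        intro hul
        have := hddt.2.2 '.' (by simp [hul]) '.' (by simp)
        rcases this with h | h <;> exact h rfl
      rw [if_pos ((endswith_dot_iff _).mpr hl), PySem.List.slice_to_neg_one, hu,
        rstripDots_append_dot, rstripDots_no_dot u hu_last, List.dropLast_concat]
      exact pad_eq (3 - u.length) u hune rfl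
    · rw [rstripDots_no_dot _ hl, if_neg (fun h => hl ((endswith_dot_iff _).mp h))]
      exact pad_eq _ _ htne rfl
  · rw [if_neg h15]
    have ht : s.take 15 = s := List.take_of_length_le (by omega)
    rw [ht, if_neg (fun h => hlast ((endswith_dot_iff _).mp h))]
    exact pad_eq _ s hne rfl

-- ===== VERDICT (by name: the statement is the Claim_ definition above) =====
theorem solution_spec : Claim_equal_solution := by
  intro new_id _
  unfold Spec_solution solution solution_alt
  dsimp only
  set u := PySem.Chars.lower new_id.toList with hu
  have hkfilter : u.filter altKeep = u.filter keepC :=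
    List.filter_congr (fun c _ => altKeep_eq_keepC c)
  have hA : solStrip (solLoop u.length u 0 []) = Jc (u.filter keepC) := by
    rw [solStrip_eq,
      loop_eq_collapse u 0 [] u.length (fun h => absurd rfl h) (by omega),
      collapse_filter,
      collapse_nil _ (fun c hc => (List.mem_filter.mp hc).2),
      (gCol_strip (u.filter keepC).length _ le_rfl).1]
  have hB : PySem.Chars.join ['.']
      ((PySem.Chars.splitOn (u.filter altKeep) ['.']).filter (fun p => p ≠ [])) =
      Jc (u.filter keepC) := by
    rw [hkfilter, splitOn_eq, PySem.Chars.join, intercalate_eq_joinB,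
      filter_splitAcc (u.filter keepC).length _ le_rfl]
    rfl
  rw [hA, hB]
  set sJ := Jc (u.filter keepC) with hsJ
  set s0 : List Char := if sJ = [] then ['a'] else sJ with hs0
  have hs0ne : s0 ≠ [] := by
    rw [hs0]
    split
    · simp
    · assumption
  have hs0hd : s0.head? ≠ some '.' := by
    rw [hs0]
    split
    · simp
    · rw [hsJ]; exact Jc_head _
  have hs0dd : noDD s0 := by
    rw [hs0]
    split
    · exact noDD_of_no_dot _ (by simp)
    · rw [hsJ]; exact joinB_noDD _ (blocks_sound _)
  have hs0last : s0.getLast? ≠ some '.' := by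
    rw [hs0]
    split
    · simp
    · rw [hsJ, ← (gCol_strip (u.filter keepC).length _ le_rfl).1]
      exact rstripDots_getLast _
  exact congrArg String.ofList (tail_eq s0 hs0ne hs0hd hs0dd hs0last)
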